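-- pv_equiv track=rewrite | github.com/Harshit-563/AI_DNS | data_engg.py | consecutive_consonants
-- ===== SOURCE A (Python) =====
-- def consecutive_consonants(domain):
--     """Maximum consecutive consonants"""
--     domain_clean = domain.replace('.', '').lower()
--     max_consecutive = 0
--     current = 0
--     for c in domain_clean:
--         if c.isalpha() and c not in 'aeiou':
--             current += 1
--             max_consecutive = max(max_consecutive, current)
--         else:
--             current = 0
--     return max_consecutive
-- ===== SOURCE B (Python) =====
-- from itertools import groupby
--
-- def consecutive_consonants(domain):
--     """Maximum consecutive consonants"""
--     cleaned = domain.replace('.', '').lower()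
--     return max(
--         (sum(1 for _ in g)
--          for is_cons, g in groupby(cleaned, key=lambda c: c.isalpha() and c not in 'aeiou')
--          if is_cons),
--         default=0,
--     )
-- ===== Notes on version B (the rewrite author's own statement) =====
-- stated objective: idiomatic
-- what changed: Replaces the manual counter/max state machine with itertools.groupby over the same consonant predicate: consonant runs are extracted as maximal groups and the answer is the max run length with default 0.
import Mathlib
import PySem

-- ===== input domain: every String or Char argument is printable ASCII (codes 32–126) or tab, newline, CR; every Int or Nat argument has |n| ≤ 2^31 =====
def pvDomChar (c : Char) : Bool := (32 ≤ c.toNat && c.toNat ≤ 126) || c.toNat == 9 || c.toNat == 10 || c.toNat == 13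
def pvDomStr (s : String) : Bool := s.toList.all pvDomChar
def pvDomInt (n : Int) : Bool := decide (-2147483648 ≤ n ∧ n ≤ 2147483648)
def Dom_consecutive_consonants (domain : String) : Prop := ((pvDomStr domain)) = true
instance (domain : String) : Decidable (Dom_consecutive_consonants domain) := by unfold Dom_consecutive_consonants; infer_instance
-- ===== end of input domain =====

-- B replaces A's manual counter/max state machine by a groupby decomposition into
-- maximal consonant runs whose lengths are maximised (objective: idiomatic).

-- shared consonant predicate: Python's `c.isalpha() and c not in 'aeiou'`
def ccKey (c : Char) : Bool := PySem.Chars.isalpha c && !(['a', 'e', 'i', 'o', 'u'].contains c)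

-- ===== PORT A =====
def consecutive_consonants (domain : String) : Int :=
  let domain_clean := (PySem.Str.lower (PySem.Str.replace domain "." "")).toList
  (domain_clean.foldl
    (fun (st : Int × Int) c =>
      if ccKey c then (max st.1 (st.2 + 1), st.2 + 1) else (st.1, 0))
    (0, 0)).1

-- ===== PORT B =====
-- port of itertools.groupby specialised to a Bool key: maximal runs of equal key
def pyGroupby (key : Char → Bool) : List Char → List (Bool × List Char)
  | [] => []
  | c :: cs =>
    match pyGroupby key cs with
    | (k, g) :: t => if key c = k then (k, c :: g) :: t else (key c, [c]) :: (k, g) :: t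
    | [] => [(key c, [c])]

def consecutive_consonants_alt (domain : String) : Int :=
  let cleaned := (PySem.Str.lower (PySem.Str.replace domain "." "")).toList
  ((pyGroupby ccKey cleaned).filterMap
      (fun p => if p.1 then some ((p.2.length : Int)) else none)).foldl max 0

-- ===== PRECONDITION & SPEC =====
def Spec_consecutive_consonants (domain : String) (out : Int) : Prop := out = consecutive_consonants_alt domain
instance (domain : String) (out : Int) : Decidable (Spec_consecutive_consonants domain out) := by unfold Spec_consecutive_consonants; infer_instance

-- ===== CLAIM (what is proved, stated in full; the proofs are below) =====
def Claim_equal_consecutive_consonants : Prop := ∀ (domain : String), Dom_consecutive_consonants domain → Spec_consecutive_consonants domain (consecutive_consonants domain)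

-- ===== LEMMAS AND PROOFS =====

-- max run length of consonants given a current run of length cur
def maxRun (cur : Int) : List Char → Int
  | [] => cur
  | c :: cs => if ccKey c then maxRun (cur + 1) cs else max cur (maxRun 0 cs)

-- B's aggregation, in foldr form
def Lmax (gs : List (Bool × List Char)) : Int :=
  (gs.filterMap (fun p => if p.1 then some ((p.2.length : Int)) else none)).foldr max 0

-- B's aggregation extended with a pending run of length n flowing into the first group
def Lext (n : Int) (gs : List (Bool × List Char)) : Int :=
  match gs with
  | (true, g) :: t => max (n + g.length) (Lmax t)
  | gs => max n (Lmax gs)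

theorem foldr_max_swap (a b : Int) (l : List Int) :
    l.foldr max (max a b) = max a (l.foldr max b) := by
  induction l with
  | nil => rfl
  | cons x xs ih => simp [List.foldr, ih, max_left_comm]

theorem foldl_max_eq_foldr (l : List Int) (a : Int) : l.foldl max a = l.foldr max a := by
  induction l generalizing a with
  | nil => rfl
  | cons x xs ih =>
    simp only [List.foldl, List.foldr]
    rw [ih, max_comm a x, foldr_max_swap]

theorem Lmax_nonneg (gs : List (Bool × List Char)) : 0 ≤ Lmax gs := by
  induction gs with
  | nil => simp [Lmax]
  | cons p t ih =>
    rcases p with ⟨k, g⟩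
    cases k <;> (simp [Lmax, List.filterMap] at *; try omega)

theorem Lmax_cons_false (g : List Char) (t : List (Bool × List Char)) :
    Lmax ((false, g) :: t) = Lmax t := by simp [Lmax]

theorem Lmax_cons_true (g : List Char) (t : List (Bool × List Char)) :
    Lmax ((true, g) :: t) = max (g.length : Int) (Lmax t) := by simp [Lmax]

theorem le_maxRun (cur : Int) (l : List Char) : cur ≤ maxRun cur l := by
  induction l generalizing cur with
  | nil => simp [maxRun]
  | cons c cs ih =>
    simp only [maxRun]
    split
    · have := ih (cur + 1); omega
    · have := ih 0; omega

theorem foldA_eq_maxRun (l : List Char) (m cur : Int) (h0 : 0 ≤ cur) (h : cur ≤ m) :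
    (l.foldl (fun (st : Int × Int) c =>
        if ccKey c then (max st.1 (st.2 + 1), st.2 + 1) else (st.1, 0)) (m, cur)).1
      = max m (maxRun cur l) := by
  induction l generalizing m cur with
  | nil => simp [maxRun]; omega
  | cons c cs ih =>
    simp only [List.foldl, maxRun]
    by_cases hk : ccKey c
    · simp only [hk, if_true]
      rw [ih (max m (cur + 1)) (cur + 1) (by omega) (by omega)]
      have := le_maxRun (cur + 1) cs
      omega
    · simp only [hk, Bool.false_eq_true, if_false]
      rw [ih m 0 (by omega) (by omega)]
      have := le_maxRun (0 : Int) cs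
      omega

theorem maxRun_eq_Lext (l : List Char) (n : Int) (hn : 0 ≤ n) :
    maxRun n l = Lext n (pyGroupby ccKey l) := by
  induction l generalizing n with
  | nil => simp [maxRun, pyGroupby, Lext, Lmax]; omega
  | cons c cs ih =>
    simp only [maxRun, pyGroupby]
    by_cases hk : ccKey c
    · simp only [hk, if_true]
      rw [ih (n + 1) (by omega)]
      rcases hG : pyGroupby ccKey cs with _ | ⟨⟨k, g⟩, t⟩
      · simp [Lext, Lmax]
      · cases k
        · simp [Lext, Lmax_cons_false]
        · simp only [if_true]
          simp [Lext]
          omega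
    · simp only [hk, Bool.false_eq_true, if_false]
      rw [ih 0 (by omega)]
      rcases hG : pyGroupby ccKey cs with _ | ⟨⟨k, g⟩, t⟩
      · simp [Lext, Lmax]
      · cases k
        · have := Lmax_nonneg t
          simp [Lext, Lmax_cons_false]
          try omega
        · have := Lmax_nonneg t
          simp [Lext, Lmax_cons_false, Lmax_cons_true]
          try omega

theorem Lext_zero (gs : List (Bool × List Char)) : Lext 0 gs = Lmax gs := by
  rcases gs with _ | ⟨⟨k, g⟩, t⟩
  · simp [Lext, Lmax]
  · cases k
    · have := Lmax_nonneg ((false, g) :: t)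
      simp [Lext]
      omega
    · simp [Lext, Lmax_cons_true]

-- ===== VERDICT (by name: the statement is the Claim_ definition above) =====
theorem consecutive_consonants_spec : Claim_equal_consecutive_consonants := by
  intro domain _
  unfold Spec_consecutive_consonants consecutive_consonants consecutive_consonants_alt
  simp only []
  rw [foldA_eq_maxRun _ 0 0 le_rfl le_rfl, maxRun_eq_Lext _ 0 le_rfl, Lext_zero,
    foldl_max_eq_foldr]
  have := Lmax_nonneg (pyGroupby ccKey ((PySem.Str.lower (PySem.Str.replace domain "." "")).toList))
  unfold Lmax at this ⊢
  omega
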